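-- pv_equiv track=rewrite | github.com/ArturCharylo/matura_informatyka_python | grudzien_2024/zadanie1.py | zadanie1_2
-- ===== SOURCE A (Python) =====
-- def zadanie1_2(n):
--     zapis_dwojkowy = 0  # Liczba całkowita reprezentująca zapis dwójkowy
--     miejsca_jedynek = 0  # Liczba całkowita reprezentująca pozycje jedynek
--     pozycja = 1  # Pozycja bitu (liczona od 1)
--     potega = 1  # Potęga 10 do budowy liczby zapis_dwojkowy
--     potega_miejsca = 1  # Potęga 10 do budowy liczby miejsca_jedynek
--
--     while n > 0:
--         reszta = n % 2
--         zapis_dwojkowy += reszta * potega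
--         if reszta == 1:
--             miejsca_jedynek += pozycja * potega_miejsca
--             potega_miejsca *= 10
--         n //= 2
--         potega *= 10
--         pozycja += 1
--
--     return zapis_dwojkowy, miejsca_jedynek
-- ===== SOURCE B (Python) =====
-- def zadanie1_2(n):
--     if n <= 0:
--         return (0, 0)
--     s = bin(n)[2:]
--     zapis_dwojkowy = int(s)
--     miejsca_jedynek = 0
--     potega = 1
--     for pozycja, ch in enumerate(reversed(s), start=1):
--         if ch == '1':
--             miejsca_jedynek += pozycja * potega
--             potega *= 10
--     return (zapis_dwojkowy, miejsca_jedynek)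
-- ===== Notes on version B (the rewrite author's own statement) =====
-- stated objective: idiomatic
-- what changed: B replaces A's single while-loop of repeated %2 and //2 arithmetic with the builtin bin(n) string: zapis_dwojkowy is int(bin(n)[2:]) directly, and the 1-bit positions come from one enumerate scan over the reversed bit string.
import Mathlib
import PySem

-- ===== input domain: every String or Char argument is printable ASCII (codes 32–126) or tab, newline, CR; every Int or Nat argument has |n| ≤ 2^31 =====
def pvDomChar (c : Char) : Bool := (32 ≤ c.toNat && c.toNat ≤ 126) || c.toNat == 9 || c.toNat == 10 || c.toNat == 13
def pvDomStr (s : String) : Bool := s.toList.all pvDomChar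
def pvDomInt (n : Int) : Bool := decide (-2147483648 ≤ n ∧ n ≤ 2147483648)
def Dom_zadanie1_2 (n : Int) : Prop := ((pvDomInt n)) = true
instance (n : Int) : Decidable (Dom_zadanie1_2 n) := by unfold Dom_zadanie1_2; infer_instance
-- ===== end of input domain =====

-- B computes the answer from the bin(n) bit string in one enumerate scan (idiomatic rewrite); A = B is proved on all inputs.

-- ===== PORT A =====
-- the while-loop of A, state carried as parameters
def zadanie1_2_loop (n zapis miejsca pozycja potega potegaM : Int) : Int × Int :=
  if 0 < n then
    let reszta := PySem.Int.mod n 2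
    let zapis' := zapis + reszta * potega
    let miejsca' := if reszta = 1 then miejsca + pozycja * potegaM else miejsca
    let potegaM' := if reszta = 1 then potegaM * 10 else potegaM
    zadanie1_2_loop (PySem.Int.floordiv n 2) zapis' miejsca' (pozycja + 1) (potega * 10) potegaM'
  else (zapis, miejsca)
termination_by n.toNat
decreasing_by
  rw [PySem.Int.floordiv_eq_ediv_of_pos (by norm_num)]
  omega

def zadanie1_2 (n : Int) : Int × Int :=
  zadanie1_2_loop n 0 0 1 1 1

-- ===== PORT B =====
-- hand port of bin(n)[2:] (PySem has no bin): since the string consists only of '0'/'1',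
-- it is modeled exactly as its list of digit values; bitsRev lists them least-significant
-- first, i.e. bitsRev n.toNat = reversed(bin(n)[2:]).
def bitsRev : Nat → List Nat
  | 0 => []
  | m + 1 => ((m + 1) % 2) :: bitsRev ((m + 1) / 2)

-- int(s) on the decimal digit string s (MSB first): the standard left fold
def decOfDigits (s : List Nat) : Int := s.foldl (fun (a : Int) (b : Nat) => a * 10 + (b : Int)) 0

-- the 'for pozycja, ch in enumerate(reversed(s), start=1)' loop of B
def altLoop : List Nat → Int → Int → Int → Int
  | [], _, miejsca, _ => miejsca
  | b :: rest, pozycja, miejsca, potega =>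
    if b = 1 then altLoop rest (pozycja + 1) (miejsca + pozycja * potega) (potega * 10)
    else altLoop rest (pozycja + 1) miejsca potega

def zadanie1_2_alt (n : Int) : Int × Int :=
  if n ≤ 0 then (0, 0)
  else
    let sRev := bitsRev n.toNat        -- reversed(bin(n)[2:]) as digit list
    (decOfDigits sRev.reverse, altLoop sRev 1 0 1)

-- ===== PRECONDITION & SPEC =====
def Spec_zadanie1_2 (n : Int) (out : Int × Int) : Prop := out = zadanie1_2_alt n
instance (n : Int) (out : Int × Int) : Decidable (Spec_zadanie1_2 n out) := by unfold Spec_zadanie1_2; infer_instance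

-- ===== CLAIM (what is proved, stated in full; the proofs are below) =====
def Claim_equal_zadanie1_2 : Prop := ∀ (n : Int), Dom_zadanie1_2 n → Spec_zadanie1_2 n (zadanie1_2 n)

-- ===== LEMMAS AND PROOFS =====

-- value of an LSB-first binary digit list read as a decimal number
def binDec : List Nat → Int
  | [] => 0
  | b :: r => (b : Int) + 10 * binDec r

-- positions of the 1-bits, packed one decimal slot per set bit, starting at position p
def onesPos : List Nat → Int → Int
  | [], _ => 0
  | b :: r, p => if b = 1 then p + 10 * onesPos r (p + 1) else onesPos r (p + 1)

theorem altLoop_eq (s : List Nat) : ∀ (p miejsca potega : Int),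
    altLoop s p miejsca potega = miejsca + potega * onesPos s p := by
  induction s with
  | nil => intro p m q; simp [altLoop, onesPos]
  | cons b r ih =>
    intro p m q
    by_cases hb : b = 1 <;> simp [altLoop, onesPos, hb, ih] <;> try ring

theorem foldr_dec (s : List Nat) :
    s.foldr (fun (b : Nat) (a : Int) => a * 10 + (b : Int)) 0 = binDec s := by
  induction s with
  | nil => rfl
  | cons b r ih => simp [ih, binDec]; ring

theorem decOfDigits_reverse (s : List Nat) : decOfDigits s.reverse = binDec s := by
  rw [decOfDigits, List.foldl_reverse, foldr_dec]

theorem loopA_eq (m : Nat) : ∀ (n zapis miejsca pozycja potega potegaM : Int), n.toNat = m →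
    zadanie1_2_loop n zapis miejsca pozycja potega potegaM =
      (zapis + potega * binDec (bitsRev m),
       miejsca + potegaM * onesPos (bitsRev m) pozycja) := by
  induction m using Nat.strong_induction_on with
  | _ m ih =>
    intro n zapis miejsca pozycja potega potegaM hm
    rw [zadanie1_2_loop]
    by_cases hn : 0 < n
    · have hnm : n = (m : Int) := by omega
      have hm0 : 0 < m := by omega
      have hmod : PySem.Int.mod n 2 = ((m % 2 : Nat) : Int) := by
        rw [hnm]; exact_mod_cast PySem.Int.mod_natCast m 2
      have hdiv : PySem.Int.floordiv n 2 = ((m / 2 : Nat) : Int) := by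
        rw [hnm]; exact_mod_cast PySem.Int.floordiv_natCast m 2
      have hbits : bitsRev m = (m % 2) :: bitsRev (m / 2) := by
        obtain ⟨k, rfl⟩ : ∃ k, m = k + 1 := ⟨m - 1, by omega⟩
        rw [bitsRev]
      have hrec : ∀ (z mi p q pm : Int),
          zadanie1_2_loop (PySem.Int.floordiv n 2) z mi p q pm =
            (z + q * binDec (bitsRev (m / 2)), mi + pm * onesPos (bitsRev (m / 2)) p) :=
        fun z mi p q pm => ih (m / 2) (by omega) _ z mi p q pm
          (by rw [hdiv]; exact Int.toNat_natCast _)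
      simp only [if_pos hn, hmod]
      rw [hrec, hbits]
      by_cases hpar : m % 2 = 1
      · simp [hpar, binDec, onesPos]
        try constructor
        all_goals ring
      · have h0 : m % 2 = 0 := by omega
        simp [h0, binDec, onesPos]
        try constructor
        all_goals ring
    · have : m = 0 := by omega
      subst this
      simp [hn, bitsRev, binDec, onesPos]

-- ===== VERDICT (by name: the statement is the Claim_ definition above) =====
theorem zadanie1_2_spec : Claim_equal_zadanie1_2 := by
  intro n _
  unfold Spec_zadanie1_2 zadanie1_2 zadanie1_2_alt
  by_cases hn : n ≤ 0
  · rw [zadanie1_2_loop]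
    simp [hn, not_lt.mpr hn]
  · rw [loopA_eq n.toNat n 0 0 1 1 1 rfl]
    simp [hn, decOfDigits_reverse, altLoop_eq]
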